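-- pv_equiv track=rewrite | github.com/dineshchhantyal/prime-counting | meissel-lehmer_method.py | phi_func
-- ===== SOURCE A (Python) =====
-- def phi_func(x,a, prime_list):
--     new_prime_list = prime_list[:a]
--     new_list = []
--     for i in range(2, x+1):
--         isPrime = True
--         for j in new_prime_list:
--             if (i % j == 0):
--                 isPrime = False
--                 break
--         if isPrime:
--             new_list.append(i)
--     return new_list
-- ===== SOURCE B (Python) =====
-- def phi_func(x, a, prime_list):
--     composites = set()
--     for p in prime_list[:a]:
--         composites.update(range(p, x + 1, p))
--     return [i for i in range(2, x + 1) if i not in composites]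
-- ===== Notes on version B (the rewrite author's own statement) =====
-- stated objective: faster
-- what changed: Replaces the per-number trial division over the prime prefix by a sieve: each prime marks its multiples up to x once into a set and the unmarked numbers are collected in one pass; Pre_ restricts the prefix to positive integers (the function's intended domain is a list of primes): A raises ZeroDivisionError on a zero entry, and on a negative entry A's 'i % j == 0' happens to treat -p like p while a sieve naturally ignores it.
-- outside the precondition, e.g. on phi_func(6, 1, [-2]): A returns [3, 5], B returns [2, 3, 4, 5, 6]; on phi_func(1, 1, [0]): A returns [], B raises ValueError; on phi_func(5, 2, [1, 0]): A returns [], B raises ValueError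
import Mathlib
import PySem

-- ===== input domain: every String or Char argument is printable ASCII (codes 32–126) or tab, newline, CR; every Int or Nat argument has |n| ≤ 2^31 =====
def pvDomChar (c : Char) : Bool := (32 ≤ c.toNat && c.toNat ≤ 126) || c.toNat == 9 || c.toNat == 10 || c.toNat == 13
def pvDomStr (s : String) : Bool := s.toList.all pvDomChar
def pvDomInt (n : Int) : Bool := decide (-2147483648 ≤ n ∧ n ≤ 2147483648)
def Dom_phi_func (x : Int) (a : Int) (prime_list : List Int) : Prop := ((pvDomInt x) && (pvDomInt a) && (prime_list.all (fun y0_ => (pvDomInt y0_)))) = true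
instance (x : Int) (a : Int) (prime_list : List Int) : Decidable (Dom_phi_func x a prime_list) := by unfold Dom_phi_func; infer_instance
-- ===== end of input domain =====

-- B replaces A's per-number trial division by a sieve (each prime marks its multiples once
-- into a set); objective: faster. Return value only; neither version mutates its arguments.

-- ===== PORT A =====
-- inner 'for j in new_prime_list: if i % j == 0: isPrime = False; break'
def phiInnerA (i : Int) : List Int → Bool
  | [] => true
  | j :: js => if PySem.Int.mod i j = 0 then false else phiInnerA i js

def phi_func (x : Int) (a : Int) (prime_list : List Int) : List Int :=
  let new_prime_list := PySem.List.slice prime_list none (some a)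
  (PySem.List.pyRange 2 (x + 1) 1).foldl
    (fun new_list i => if phiInnerA i new_prime_list then new_list ++ [i] else new_list) []

-- ===== PORT B =====
def phi_func_alt (x : Int) (a : Int) (prime_list : List Int) : List Int :=
  let composites : PySem.Set Int :=
    (PySem.List.slice prime_list none (some a)).foldl
      (fun s p => PySem.Set.update s (PySem.List.pyRange p (x + 1) p)) PySem.Set.empty
  (PySem.List.pyRange 2 (x + 1) 1).filter (fun i => !(PySem.Set.contains composites i))

-- ===== PRECONDITION & SPEC =====
-- The function's intended domain is a prefix of the list of primes, so Pre_ requires every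
-- element of prime_list[:a] to be a positive integer (unless x < 2, where A's loop never runs
-- and any nonzero entries are harmless): on a zero entry A raises ZeroDivisionError where B's
-- range(p, x+1, p) raises ValueError, and on a negative entry A's 'i % j == 0' test happens
-- to treat -p like p while a sieve over a prime list naturally ignores it.
def Pre_phi_func (x : Int) (a : Int) (prime_list : List Int) : Prop :=
  (∀ p ∈ PySem.List.slice prime_list none (some a), 1 ≤ p) ∨
  (x < 2 ∧ (0 : Int) ∉ PySem.List.slice prime_list none (some a))
instance (x : Int) (a : Int) (prime_list : List Int) : Decidable (Pre_phi_func x a prime_list) := by unfold Pre_phi_func; infer_instance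
def pvWitness_phi_func : Int × Int × List Int := (10, 2, [2, 3])

def Spec_phi_func (x : Int) (a : Int) (prime_list : List Int) (out : List Int) : Prop := out = phi_func_alt x a prime_list
instance (x : Int) (a : Int) (prime_list : List Int) (out : List Int) : Decidable (Spec_phi_func x a prime_list out) := by unfold Spec_phi_func; infer_instance

-- ===== CLAIM (what is proved, stated in full; the proofs are below) =====
def Claim_equal_phi_func : Prop := ∀ (x : Int) (a : Int) (prime_list : List Int), Dom_phi_func x a prime_list → Pre_phi_func x a prime_list → Spec_phi_func x a prime_list (phi_func x a prime_list)

-- ===== LEMMAS AND PROOFS =====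

-- A's inner break-loop succeeds iff no element of the list divides i
theorem phiInnerA_true_iff (i : Int) (l : List Int) :
    phiInnerA i l = true ↔ ∀ j ∈ l, ¬ j ∣ i := by
  induction l with
  | nil => simp [phiInnerA]
  | cons j js ih =>
    simp only [phiInnerA, List.mem_cons]
    by_cases h : PySem.Int.mod i j = 0
    · simp [h, (PySem.Int.mod_eq_zero_iff_dvd i j).mp h]
    · have hj : ¬ j ∣ i := fun hd => h ((PySem.Int.mod_eq_zero_iff_dvd i j).mpr hd)
      simp [h, ih, hj]

-- membership in B's composites set
theorem mem_composites (x : Int) (l : List Int) (s : PySem.Set Int) (i : Int) :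
    i ∈ l.foldl (fun s p => PySem.Set.update s (PySem.List.pyRange p (x + 1) p)) s
    ↔ i ∈ s ∨ ∃ p ∈ l, i ∈ PySem.List.pyRange p (x + 1) p := by
  induction l generalizing s with
  | nil => simp
  | cons p ps ih =>
    simp only [List.foldl_cons, ih, PySem.Set.mem_update, List.mem_cons]
    constructor
    · rintro (⟨h | h⟩ | ⟨q, hq, hmem⟩)
      · exact Or.inl h
      · exact Or.inr ⟨p, Or.inl rfl, h⟩
      · exact Or.inr ⟨q, Or.inr hq, hmem⟩
    · rintro (h | ⟨q, rfl | hq', hmem⟩)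
      · exact Or.inl (Or.inl h)
      · exact Or.inl (Or.inr hmem)
      · exact Or.inr ⟨q, hq', hmem⟩

-- for a positive p and 2 ≤ i ≤ x, divisibility by p is exactly membership in p's sieve range
theorem divides_iff_mem_range (x i p : Int) (hp : 1 ≤ p) (hi : 2 ≤ i) (hix : i < x + 1) :
    p ∣ i ↔ i ∈ PySem.List.pyRange p (x + 1) p := by
  rw [PySem.List.mem_pyRange_iff_of_pos (by omega)]
  constructor
  · intro hd
    exact ⟨Int.le_of_dvd (by omega) hd, hix, dvd_sub hd dvd_rfl⟩
  · rintro ⟨-, -, hd⟩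
    simpa using dvd_add hd (dvd_refl p)

-- ===== VERDICT (by name: the statement is the Claim_ definition above) =====
theorem phi_func_spec : Claim_equal_phi_func := by
  intro x a prime_list _ hpre
  unfold Spec_phi_func phi_func phi_func_alt
  set npl := PySem.List.slice prime_list none (some a) with hnpl
  rw [PySem.List.foldl_append_if_eq_filter (p := fun i => phiInnerA i npl)]
  simp only [List.nil_append]
  apply List.filter_congr
  intro i hi
  have hi2 : 2 ≤ i ∧ i < x + 1 := (PySem.List.mem_pyRange_one).mp hi
  have hpos : ∀ p ∈ npl, 1 ≤ p := by
    rcases hpre with h | ⟨hx, _⟩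
    · exact h
    · exact absurd hi (by rw [PySem.List.pyRange_one_eq_nil (by omega)]; simp)
  rw [show (phiInnerA i npl = (!PySem.Set.contains
        (npl.foldl (fun s p => PySem.Set.update s (PySem.List.pyRange p (x + 1) p))
          PySem.Set.empty) i)) ↔
      (phiInnerA i npl = true ↔ ¬ (PySem.Set.contains
        (npl.foldl (fun s p => PySem.Set.update s (PySem.List.pyRange p (x + 1) p))
          PySem.Set.empty) i = true)) from by
    cases phiInnerA i npl <;> simp]
  rw [phiInnerA_true_iff, PySem.Set.contains_iff, mem_composites]
  simp only [PySem.Set.empty, List.not_mem_nil, false_or]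
  constructor
  · rintro h ⟨p, hpmem, hmem⟩
    exact h p hpmem ((divides_iff_mem_range x i p (hpos p hpmem) hi2.1 hi2.2).mpr hmem)
  · intro h j hj hdvd
    exact h ⟨j, hj, (divides_iff_mem_range x i j (hpos j hj) hi2.1 hi2.2).mp hdvd⟩
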